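-- pv_equiv track=rewrite | github.com/AaronMacF/advent-of-code-2024 | python/src/days/day8/day_8_part_2.py | get_valid_antinode_coords_including_resonants
-- ===== SOURCE A (Python) =====
-- from typing import DefaultDict, List, Set, Tuple
--
-- Coordinates = Tuple[int, int]
--
-- def get_valid_antinode_coords_including_resonants(
--     antenna1: Coordinates, antenna2: Coordinates, max_row_index: int, max_col_index: int
-- ) -> Set[Coordinates]:
--     # For a pair of antennas, work out all possible locations of antinodes, including themselves
--     antinode_coords: Set[Coordinates] = set()
--
--     # Get all antinodes working backwards from antenna1 (inclusive)
--     coords_diff: Coordinates = (antenna1[0] - antenna2[0], antenna1[1] - antenna2[1])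
--     next_pos: Coordinates = antenna1
--     while True:
--         if are_coords_in_map(next_pos, max_row_index, max_col_index):
--             antinode_coords.add(next_pos)
--             next_pos = coords_plus_diff(next_pos, coords_diff)
--         else:
--             break
--
--     # Get all antinodes working forwards from antenna1 (exclusive)
--     coords_diff = (-coords_diff[0], -coords_diff[1])
--     next_pos = coords_plus_diff(antenna1, coords_diff)
--     while True:
--         if are_coords_in_map(next_pos, max_row_index, max_col_index):
--             antinode_coords.add(next_pos)
--             next_pos = coords_plus_diff(next_pos, coords_diff)
--         else:
--             break
--     return antinode_coords
--
-- def coords_plus_diff(coords: Coordinates, diff: Coordinates) -> Coordinates: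
--     return (coords[0] + diff[0], coords[1] + diff[1])
--
-- def are_coords_in_map(
--     coords: Coordinates, max_row_index: int, max_col_index: int
-- ) -> bool:
--     return (
--         coords[0] >= 0
--         and coords[0] <= max_row_index
--         and coords[1] >= 0
--         and coords[1] <= max_col_index
--     )
-- ===== SOURCE B (Python) =====
-- def get_valid_antinode_coords_including_resonants(antenna1, antenna2, max_row_index, max_col_index):
--     # Arithmetic version: instead of stepping until out of bounds, compute in closed
--     # form how many steps stay inside the grid from each antenna, and enumerate them.
--     dr = antenna1[0] - antenna2[0]
--     dc = antenna1[1] - antenna2[1]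
--     result = set()
--     for (r, c), (sr, sc) in ((antenna1, (dr, dc)), (antenna2, (-dr, -dc))):
--         if 0 <= r <= max_row_index and 0 <= c <= max_col_index:
--             hi = _steps_in_grid(r, c, sr, sc, max_row_index, max_col_index)
--             result.update((r + k * sr, c + k * sc) for k in range(hi + 1))
--     return result
--
--
-- def _steps_in_grid(r, c, sr, sc, max_row_index, max_col_index):
--     # Largest k >= 0 with (r + k*sr, c + k*sc) still inside the grid, assuming
--     # (r, c) itself is inside; raises ValueError if the step is (0, 0).
--     bounds = []
--     if sr:
--         bounds.append((max_row_index - r) // sr if sr > 0 else r // (-sr))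
--     if sc:
--         bounds.append((max_col_index - c) // sc if sc > 0 else c // (-sc))
--     return min(bounds)
-- ===== Notes on version B (the rewrite author's own statement) =====
-- stated objective: alternative
-- what changed: B replaces A's two step-until-out-of-bounds walks with a closed-form floor-division computation of how many steps stay inside the grid from each antenna, then enumerates exactly those points; both cost O(size of the returned set).
import Mathlib
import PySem

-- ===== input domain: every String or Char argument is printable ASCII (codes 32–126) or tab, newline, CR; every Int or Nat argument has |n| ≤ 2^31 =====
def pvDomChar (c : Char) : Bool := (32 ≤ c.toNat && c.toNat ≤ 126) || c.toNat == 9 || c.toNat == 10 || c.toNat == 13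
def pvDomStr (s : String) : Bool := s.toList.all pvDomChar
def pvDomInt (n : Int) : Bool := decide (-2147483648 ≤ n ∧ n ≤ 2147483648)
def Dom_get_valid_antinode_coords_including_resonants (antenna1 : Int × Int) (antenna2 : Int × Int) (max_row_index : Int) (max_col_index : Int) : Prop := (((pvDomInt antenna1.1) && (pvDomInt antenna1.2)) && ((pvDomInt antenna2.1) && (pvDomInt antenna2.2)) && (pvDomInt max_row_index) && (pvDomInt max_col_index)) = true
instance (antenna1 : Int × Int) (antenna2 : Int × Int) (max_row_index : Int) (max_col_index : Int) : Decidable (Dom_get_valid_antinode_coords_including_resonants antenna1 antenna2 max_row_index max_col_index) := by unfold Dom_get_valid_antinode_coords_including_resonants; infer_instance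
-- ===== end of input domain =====

-- B computes the in-grid step counts by closed-form floor division instead of A's step-until-out-of-bounds walks (alternative algorithm, same cost in the output size).

-- ===== PORT A =====
-- port of helper coords_plus_diff
def pvCoordsPlusDiff (coords : Int × Int) (diff : Int × Int) : Int × Int :=
  (coords.1 + diff.1, coords.2 + diff.2)

-- port of helper are_coords_in_map
def pvAreCoordsInMap (coords : Int × Int) (max_row_index : Int) (max_col_index : Int) : Bool :=
  decide (coords.1 ≥ 0) && decide (coords.1 ≤ max_row_index) && decide (coords.2 ≥ 0) && decide (coords.2 ≤ max_col_index)

-- A's 'while True: if in_map: add and step, else break' loop, with fuel: on every input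
-- admitted by Pre_ the loop runs at most max_row_index + max_col_index + 2 < pvFuel times
-- (proved below), so the fuel is never exhausted there; without Pre_ the Python loop diverges.
def pvFuel : Nat := 8589934592  -- 2^33

def pvWhileAdd (fuel : Nat) (antinode_coords : PySem.Set (Int × Int)) (next_pos : Int × Int)
    (coords_diff : Int × Int) (max_row_index : Int) (max_col_index : Int) : PySem.Set (Int × Int) :=
  match fuel with
  | 0 => antinode_coords
  | fuel + 1 =>
    if pvAreCoordsInMap next_pos max_row_index max_col_index then
      pvWhileAdd fuel (PySem.Set.add antinode_coords next_pos) (pvCoordsPlusDiff next_pos coords_diff)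
        coords_diff max_row_index max_col_index
    else antinode_coords

def get_valid_antinode_coords_including_resonants (antenna1 : Int × Int) (antenna2 : Int × Int) (max_row_index : Int) (max_col_index : Int) : List (Int × Int) :=
  let antinode_coords : PySem.Set (Int × Int) := PySem.Set.empty
  let coords_diff : Int × Int := (antenna1.1 - antenna2.1, antenna1.2 - antenna2.2)
  -- backwards from antenna1 (inclusive)
  let antinode_coords := pvWhileAdd pvFuel antinode_coords antenna1 coords_diff max_row_index max_col_index
  -- forwards from antenna1 (exclusive)
  let coords_diff : Int × Int := (-coords_diff.1, -coords_diff.2)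
  let next_pos := pvCoordsPlusDiff antenna1 coords_diff
  pvWhileAdd pvFuel antinode_coords next_pos coords_diff max_row_index max_col_index

-- ===== PORT B =====
-- port of B's helper _steps_in_grid
def pvStepsInGrid (r c sr sc max_row_index max_col_index : Int) : Int :=
  let bounds : List Int :=
    (if sr ≠ 0 then [if 0 < sr then PySem.Int.floordiv (max_row_index - r) sr else PySem.Int.floordiv r (-sr)] else [])
    ++ (if sc ≠ 0 then [if 0 < sc then PySem.Int.floordiv (max_col_index - c) sc else PySem.Int.floordiv c (-sc)] else [])
  -- Python's min(bounds) raises ValueError only when bounds = [], i.e. sr = sc = 0; that case is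
  -- excluded by Pre_ (equal antennas inside the grid); -1 is a stand-in value there
  (bounds.min?).getD (-1)

def get_valid_antinode_coords_including_resonants_alt (antenna1 : Int × Int) (antenna2 : Int × Int) (max_row_index : Int) (max_col_index : Int) : List (Int × Int) :=
  let dr := antenna1.1 - antenna2.1
  let dc := antenna1.2 - antenna2.2
  [(antenna1, (dr, dc)), (antenna2, (-dr, -dc))].foldl
    (fun result x =>
      let r := x.1.1; let c := x.1.2; let sr := x.2.1; let sc := x.2.2
      if decide (0 ≤ r) && decide (r ≤ max_row_index) && decide (0 ≤ c) && decide (c ≤ max_col_index) then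
        let hi := pvStepsInGrid r c sr sc max_row_index max_col_index
        PySem.Set.update result ((PySem.List.pyRange 0 (hi + 1) 1).map (fun k => (r + k * sr, c + k * sc)))
      else result)
    PySem.Set.empty

-- ===== PRECONDITION & SPEC =====
-- Pre_ excludes only equal antennas lying inside the grid: there A's first while loop never
-- terminates (the difference vector is (0,0)), and B raises ValueError (min of an empty list).
def Pre_get_valid_antinode_coords_including_resonants (antenna1 : Int × Int) (antenna2 : Int × Int) (max_row_index : Int) (max_col_index : Int) : Prop :=
  ¬ (antenna1 = antenna2 ∧ 0 ≤ antenna1.1 ∧ antenna1.1 ≤ max_row_index ∧ 0 ≤ antenna1.2 ∧ antenna1.2 ≤ max_col_index)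
instance (antenna1 : Int × Int) (antenna2 : Int × Int) (max_row_index : Int) (max_col_index : Int) : Decidable (Pre_get_valid_antinode_coords_including_resonants antenna1 antenna2 max_row_index max_col_index) := by unfold Pre_get_valid_antinode_coords_including_resonants; infer_instance

def pvWitness_get_valid_antinode_coords_including_resonants : (Int × Int) × (Int × Int) × Int × Int := ((0, 0), (1, 1), 3, 3)

def Spec_get_valid_antinode_coords_including_resonants (antenna1 : Int × Int) (antenna2 : Int × Int) (max_row_index : Int) (max_col_index : Int) (out : List (Int × Int)) : Prop := out = get_valid_antinode_coords_including_resonants_alt antenna1 antenna2 max_row_index max_col_index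
instance (antenna1 : Int × Int) (antenna2 : Int × Int) (max_row_index : Int) (max_col_index : Int) (out : List (Int × Int)) : Decidable (Spec_get_valid_antinode_coords_including_resonants antenna1 antenna2 max_row_index max_col_index out) := by unfold Spec_get_valid_antinode_coords_including_resonants; infer_instance

-- ===== CLAIM (what is proved, stated in full; the proofs are below) =====
def Claim_equal_get_valid_antinode_coords_including_resonants : Prop := ∀ (antenna1 : Int × Int) (antenna2 : Int × Int) (max_row_index : Int) (max_col_index : Int), Dom_get_valid_antinode_coords_including_resonants antenna1 antenna2 max_row_index max_col_index → Pre_get_valid_antinode_coords_including_resonants antenna1 antenna2 max_row_index max_col_index → Spec_get_valid_antinode_coords_including_resonants antenna1 antenna2 max_row_index max_col_index (get_valid_antinode_coords_including_resonants antenna1 antenna2 max_row_index max_col_index)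

-- ===== LEMMAS AND PROOFS =====

-- If the current position is out of the map, the loop returns its accumulator (any fuel).
theorem pvWhileAdd_notin (fuel : Nat) (s : PySem.Set (Int × Int)) (p d : Int × Int) (mR mC : Int)
    (h : pvAreCoordsInMap p mR mC = false) : pvWhileAdd fuel s p d mR mC = s := by
  cases fuel with
  | zero => rfl
  | succ n => simp [pvWhileAdd, h]

-- Loop characterisation: if positions 0..h on the line are in the map and position h+1 is not,
-- the loop adds exactly the first h+1 line points, in order.
theorem pvWhileAdd_run (mR mC sr sc : Int) (h : Nat) :
    ∀ (fuel : Nat) (s : PySem.Set (Int × Int)) (r c : Int), h < fuel →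
    (∀ k : Nat, k ≤ h → pvAreCoordsInMap (r + k * sr, c + k * sc) mR mC = true) →
    pvAreCoordsInMap (r + (h + 1 : Nat) * sr, c + (h + 1 : Nat) * sc) mR mC = false →
    pvWhileAdd fuel s (r, c) (sr, sc) mR mC
      = PySem.Set.update s ((List.range (h + 1)).map (fun k : Nat => ((r + (k : Int) * sr, c + (k : Int) * sc) : Int × Int))) := by
  induction h with
  | zero =>
    intro fuel s r c hf hin hout
    obtain ⟨n, rfl⟩ : ∃ n, fuel = n + 1 := ⟨fuel - 1, by omega⟩
    have h0 : pvAreCoordsInMap (r, c) mR mC = true := by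
      have := hin 0 (le_refl 0); simpa using this
    rw [pvWhileAdd, if_pos h0]
    have h1 : pvAreCoordsInMap (pvCoordsPlusDiff (r, c) (sr, sc)) mR mC = false := by
      simpa [pvCoordsPlusDiff] using hout
    rw [pvWhileAdd_notin _ _ _ _ _ _ h1]
    simp [PySem.Set.update_cons, PySem.Set.update_nil]
  | succ h ih =>
    intro fuel s r c hf hin hout
    obtain ⟨n, rfl⟩ : ∃ n, fuel = n + 1 := ⟨fuel - 1, by omega⟩
    have h0 : pvAreCoordsInMap (r, c) mR mC = true := by
      have := hin 0 (by omega); simpa using this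
    rw [pvWhileAdd, if_pos h0]
    have hstep : pvCoordsPlusDiff (r, c) (sr, sc) = (r + sr, c + sc) := rfl
    rw [hstep]
    have := ih n (PySem.Set.add s (r, c)) (r + sr) (c + sc) (by omega)
      (by intro k hk
          have := hin (k + 1) (by omega)
          convert this using 3 <;> push_cast <;> ring)
      (by convert hout using 3 <;> push_cast <;> ring)
    rw [this]
    rw [show List.range (h + 1 + 1) = 0 :: List.map Nat.succ (List.range (h + 1)) from List.range_succ_eq_map, List.map_cons, List.map_map, PySem.Set.update_cons]
    congr 1
    · norm_num
    · apply List.map_congr_left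
      intro k hk
      simp only [Function.comp_apply, Prod.mk.injEq]
      push_cast
      constructor <;> ring

-- Per-axis facts about the closed-form bound B computes with floor divisions.
theorem pvAxis_spec (p m s : Int) (hs : s ≠ 0) (h0 : 0 ≤ p) (h1 : p ≤ m) :
    0 ≤ (if 0 < s then PySem.Int.floordiv (m - p) s else PySem.Int.floordiv p (-s)) ∧
    (if 0 < s then PySem.Int.floordiv (m - p) s else PySem.Int.floordiv p (-s)) ≤ m ∧
    (∀ k : Int, 0 ≤ k → k ≤ (if 0 < s then PySem.Int.floordiv (m - p) s else PySem.Int.floordiv p (-s)) →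
      0 ≤ p + k * s ∧ p + k * s ≤ m) ∧
    ¬ (0 ≤ p + ((if 0 < s then PySem.Int.floordiv (m - p) s else PySem.Int.floordiv p (-s)) + 1) * s ∧
       p + ((if 0 < s then PySem.Int.floordiv (m - p) s else PySem.Int.floordiv p (-s)) + 1) * s ≤ m) := by
  by_cases hpos : 0 < s
  · simp only [if_pos hpos]
    set b := PySem.Int.floordiv (m - p) s with hb
    have hbr : ∀ q : Int, q ≤ b ↔ q * s ≤ m - p := fun q => PySem.Int.le_floordiv_iff_mul_le hpos
    have hb0 : 0 ≤ b := (hbr 0).2 (by nlinarith)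
    have hbm : b ≤ m := by have := (hbr b).1 le_rfl; nlinarith
    refine ⟨hb0, hbm, ?_, ?_⟩
    · intro k hk0 hkb
      have := (hbr k).1 hkb
      constructor <;> nlinarith
    · have : ¬ ((b + 1) * s ≤ m - p) := by
        intro hcon; exact absurd ((hbr (b + 1)).2 hcon) (by omega)
      rintro ⟨u, v⟩
      exact this (by linarith)
  · have hneg : 0 < -s := by omega
    simp only [if_neg hpos]
    set b := PySem.Int.floordiv p (-s) with hb
    have hbr : ∀ q : Int, q ≤ b ↔ q * (-s) ≤ p := fun q => PySem.Int.le_floordiv_iff_mul_le hneg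
    have hb0 : 0 ≤ b := (hbr 0).2 (by nlinarith)
    have hbm : b ≤ m := by have := (hbr b).1 le_rfl; nlinarith
    refine ⟨hb0, hbm, ?_, ?_⟩
    · intro k hk0 hkb
      have := (hbr k).1 hkb
      constructor <;> nlinarith
    · have : ¬ ((b + 1) * (-s) ≤ p) := by
        intro hcon; exact absurd ((hbr (b + 1)).2 hcon) (by omega)
      rintro ⟨u, v⟩
      exact this (by linarith)

-- Spec of B's closed-form step count: nonnegative, bounded, and it delimits exactly
-- the in-map prefix of the line from (r, c) along (sr, sc).
theorem pvStepsInGrid_spec (r c sr sc mR mC : Int) (hne : ¬ (sr = 0 ∧ sc = 0))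
    (hr0 : 0 ≤ r) (hr1 : r ≤ mR) (hc0 : 0 ≤ c) (hc1 : c ≤ mC) :
    0 ≤ pvStepsInGrid r c sr sc mR mC ∧ pvStepsInGrid r c sr sc mR mC ≤ mR + mC ∧
    (∀ k : Int, 0 ≤ k → k ≤ pvStepsInGrid r c sr sc mR mC →
      pvAreCoordsInMap (r + k * sr, c + k * sc) mR mC = true) ∧
    pvAreCoordsInMap (r + (pvStepsInGrid r c sr sc mR mC + 1) * sr,
                      c + (pvStepsInGrid r c sr sc mR mC + 1) * sc) mR mC = false := by
  by_cases hsr : sr = 0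
  · have hsc : sc ≠ 0 := fun h => hne ⟨hsr, h⟩
    obtain ⟨hb0, hbm, hin, hstop⟩ := pvAxis_spec c mC sc hsc hc0 hc1
    have hH : pvStepsInGrid r c sr sc mR mC
        = (if 0 < sc then PySem.Int.floordiv (mC - c) sc else PySem.Int.floordiv c (-sc)) := by
      simp [pvStepsInGrid, hsr, hsc, List.min?]
    rw [hH]
    refine ⟨hb0, by omega, ?_, ?_⟩
    · intro k hk0 hkb
      obtain ⟨u, v⟩ := hin k hk0 hkb
      simp [pvAreCoordsInMap, hsr]
      and_intros <;> assumption
    · simp [pvAreCoordsInMap, hsr]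
      intro _ _ u
      omega
  · by_cases hsc : sc = 0
    · obtain ⟨hb0, hbm, hin, hstop⟩ := pvAxis_spec r mR sr hsr hr0 hr1
      have hH : pvStepsInGrid r c sr sc mR mC
          = (if 0 < sr then PySem.Int.floordiv (mR - r) sr else PySem.Int.floordiv r (-sr)) := by
        simp [pvStepsInGrid, hsr, hsc, List.min?]
      rw [hH]
      refine ⟨hb0, by omega, ?_, ?_⟩
      · intro k hk0 hkb
        obtain ⟨u, v⟩ := hin k hk0 hkb
        simp [pvAreCoordsInMap, hsc]
        and_intros <;> assumption
      · simp [pvAreCoordsInMap, hsc]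
        intro u v
        omega
    · obtain ⟨hbr0, hbrm, hinr, hstopr⟩ := pvAxis_spec r mR sr hsr hr0 hr1
      obtain ⟨hbc0, hbcm, hinc, hstopc⟩ := pvAxis_spec c mC sc hsc hc0 hc1
      have hH : pvStepsInGrid r c sr sc mR mC
          = min (if 0 < sr then PySem.Int.floordiv (mR - r) sr else PySem.Int.floordiv r (-sr))
                (if 0 < sc then PySem.Int.floordiv (mC - c) sc else PySem.Int.floordiv c (-sc)) := by
        simp [pvStepsInGrid, hsr, hsc, List.min?]
      rw [hH]
      set br := (if 0 < sr then PySem.Int.floordiv (mR - r) sr else PySem.Int.floordiv r (-sr))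
      set bc := (if 0 < sc then PySem.Int.floordiv (mC - c) sc else PySem.Int.floordiv c (-sc))
      refine ⟨by omega, by omega, ?_, ?_⟩
      · intro k hk0 hkb
        obtain ⟨u1, v1⟩ := hinr k hk0 (by omega)
        obtain ⟨u2, v2⟩ := hinc k hk0 (by omega)
        simp [pvAreCoordsInMap]
        and_intros <;> assumption
      · rcases le_total br bc with hle | hle
        · rw [min_eq_left hle]
          simp [pvAreCoordsInMap]
          intro u v
          omega
        · rw [min_eq_right hle]
          simp [pvAreCoordsInMap]
          intro u v w
          omega

-- Combined per-antenna lemma: one walking loop of A equals one closed-form part of B.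
theorem pvLoop_eq_part (a : Int × Int) (sr sc mR mC : Int) (s : PySem.Set (Int × Int))
    (hne : pvAreCoordsInMap a mR mC = true → ¬ (sr = 0 ∧ sc = 0))
    (hmR : mR ≤ 2147483648) (hmC : mC ≤ 2147483648) :
    pvWhileAdd pvFuel s a (sr, sc) mR mC =
      (if decide (0 ≤ a.1) && decide (a.1 ≤ mR) && decide (0 ≤ a.2) && decide (a.2 ≤ mC) then
        PySem.Set.update s ((PySem.List.pyRange 0 (pvStepsInGrid a.1 a.2 sr sc mR mC + 1) 1).map
          (fun k => (a.1 + k * sr, a.2 + k * sc)))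
      else s) := by
  have hguard : (decide (0 ≤ a.1) && decide (a.1 ≤ mR) && decide (0 ≤ a.2) && decide (a.2 ≤ mC))
      = pvAreCoordsInMap a mR mC := by
    simp [pvAreCoordsInMap]
  rw [hguard]
  cases hin : pvAreCoordsInMap a mR mC with
  | false => rw [if_neg (by simp), pvWhileAdd_notin _ _ _ _ _ _ hin]
  | true =>
    rw [if_pos rfl]
    have hins : ((0 ≤ a.1 ∧ a.1 ≤ mR) ∧ 0 ≤ a.2) ∧ a.2 ≤ mC := by
      simpa [pvAreCoordsInMap] using hin
    obtain ⟨⟨⟨h1, h2⟩, h3⟩, h4⟩ := hins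
    obtain ⟨hH0, hHm, hkin, hkout⟩ := pvStepsInGrid_spec a.1 a.2 sr sc mR mC (hne hin) h1 h2 h3 h4
    set H := pvStepsInGrid a.1 a.2 sr sc mR mC with hHd
    have htn : (H.toNat : Int) = H := Int.toNat_of_nonneg hH0
    have hrun := pvWhileAdd_run mR mC sr sc H.toNat pvFuel s a.1 a.2
      (by unfold pvFuel; omega)
      (by intro k hk
          exact hkin k (by omega) (by omega))
      (by have : ((H.toNat + 1 : Nat) : Int) = H + 1 := by omega
          rw [this]; exact hkout)
    rw [show ((a.1, a.2) : Int × Int) = a from rfl] at hrun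
    rw [hrun]
    congr 1
    rw [PySem.List.pyRange_one, List.map_map]
    have hlen : (H + 1 - 0).toNat = H.toNat + 1 := by omega
    rw [hlen]
    apply List.map_congr_left
    intro k hk
    simp

-- ===== VERDICT (by name: the statement is the Claim_ definition above) =====
theorem get_valid_antinode_coords_including_resonants_spec : Claim_equal_get_valid_antinode_coords_including_resonants := by
  intro a1 a2 mR mC hdom hpre
  unfold Spec_get_valid_antinode_coords_including_resonants
  have hmR : mR ≤ 2147483648 := by
    simp [Dom_get_valid_antinode_coords_including_resonants, pvDomInt] at hdom; omega
  have hmC : mC ≤ 2147483648 := by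
    simp [Dom_get_valid_antinode_coords_including_resonants, pvDomInt] at hdom; omega
  have heq : (a1.1 - a2.1 = 0 ∧ a1.2 - a2.2 = 0) → a1 = a2 := by
    rintro ⟨u, v⟩; exact Prod.ext (by omega) (by omega)
  have hne1 : pvAreCoordsInMap a1 mR mC = true → ¬ (a1.1 - a2.1 = 0 ∧ a1.2 - a2.2 = 0) := by
    intro hin hc
    have hb : ((0 ≤ a1.1 ∧ a1.1 ≤ mR) ∧ 0 ≤ a1.2) ∧ a1.2 ≤ mC := by
      simpa [pvAreCoordsInMap] using hin
    exact hpre ⟨heq hc, by tauto, by tauto, by tauto, by tauto⟩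
  have hne2 : pvAreCoordsInMap a2 mR mC = true → ¬ (-(a1.1 - a2.1) = 0 ∧ -(a1.2 - a2.2) = 0) := by
    intro hin hc
    have hc' : a1.1 - a2.1 = 0 ∧ a1.2 - a2.2 = 0 := by omega
    have ha : a1 = a2 := heq hc'
    rw [← ha] at hin
    exact hne1 hin hc'
  have hpos : pvCoordsPlusDiff a1 (-(a1.1 - a2.1), -(a1.2 - a2.2)) = a2 := by
    simp [pvCoordsPlusDiff]
  show pvWhileAdd pvFuel (pvWhileAdd pvFuel PySem.Set.empty a1 (a1.1 - a2.1, a1.2 - a2.2) mR mC)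
      (pvCoordsPlusDiff a1 (-(a1.1 - a2.1), -(a1.2 - a2.2))) (-(a1.1 - a2.1), -(a1.2 - a2.2)) mR mC
      = get_valid_antinode_coords_including_resonants_alt a1 a2 mR mC
  rw [hpos]
  rw [pvLoop_eq_part a1 (a1.1 - a2.1) (a1.2 - a2.2) mR mC PySem.Set.empty hne1 hmR hmC]
  rw [pvLoop_eq_part a2 (-(a1.1 - a2.1)) (-(a1.2 - a2.2)) mR mC _ hne2 hmR hmC]
  simp only [get_valid_antinode_coords_including_resonants_alt, List.foldl]
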